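-- pv_equiv track=rewrite | github.com/Amitro123/security_monitor | security_check.py | _score_findings
-- ===== SOURCE A (Python) =====
-- P0        = "CRITICAL"
--
-- P1        = "HIGH"
--
-- P2        = "MEDIUM"
--
-- P3        = "LOW"
--
-- def _score_findings(all_findings: dict) -> int:
--     """Calculate a 0-100 security score. 100 = clean, 0 = critical.
--
--     Scoring is capped per-check (max -20 per check) so a single noisy
--     check with many findings can't tank the whole score on its own.
--     """
--     deductions = {P0: 20, P1: 12, P2: 4, P3: 1}
--     total_deducted = 0
--     for findings in all_findings.values():
--         # Cap deduction per check at the worst single finding's value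
--         if not findings:
--             continue
--         worst = max(deductions.get(sev, 0) for sev, _ in findings)
--         total_deducted += worst
--     return max(0, 100 - total_deducted)
-- ===== SOURCE B (Python) =====
-- _PRIORITY = (("CRITICAL", 20), ("HIGH", 12), ("MEDIUM", 4), ("LOW", 1))
--
--
-- def _score_findings(all_findings: dict) -> int:
--     """Priority-scan reformulation: per check, look up the highest-ranked
--     severity present in a set and add its deduction (early exit)."""
--     total_deducted = 0
--     for findings in all_findings.values():
--         present = {sev for sev, _ in findings}
--         for sev, ded in _PRIORITY:
--             if sev in present:
--                 total_deducted += ded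
--                 break
--     return max(0, 100 - total_deducted)
-- ===== Notes on version B (the rewrite author's own statement) =====
-- stated objective: idiomatic
-- what changed: Replaces the per-check max over a mapped deduction generator with a set of present severities scanned against a fixed priority list with early exit (empty/unknown-only checks naturally add 0).
import Mathlib
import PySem

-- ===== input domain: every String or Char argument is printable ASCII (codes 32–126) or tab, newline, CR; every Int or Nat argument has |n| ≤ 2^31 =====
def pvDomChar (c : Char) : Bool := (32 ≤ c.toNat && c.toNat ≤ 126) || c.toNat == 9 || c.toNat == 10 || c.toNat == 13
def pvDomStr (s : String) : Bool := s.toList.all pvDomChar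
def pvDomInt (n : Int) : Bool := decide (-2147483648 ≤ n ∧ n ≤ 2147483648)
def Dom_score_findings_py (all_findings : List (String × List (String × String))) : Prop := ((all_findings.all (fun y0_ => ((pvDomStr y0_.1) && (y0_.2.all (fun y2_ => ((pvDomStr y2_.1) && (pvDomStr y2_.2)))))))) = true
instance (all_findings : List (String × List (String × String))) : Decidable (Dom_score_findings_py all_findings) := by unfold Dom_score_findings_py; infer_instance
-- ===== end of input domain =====

-- B replaces A's per-check max over mapped deduction values by a priority-ordered
-- membership scan over the set of present severities (idiomatic; same cost).

-- ===== PORT A =====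
def pvDeductions : PySem.Dict String Int :=
  PySem.Dict.ofList [("CRITICAL", (20 : Int)), ("HIGH", 12), ("MEDIUM", 4), ("LOW", 1)]

def score_findings_py (all_findings : List (String × List (String × String))) : Int :=
  let total_deducted :=
    all_findings.foldl (fun acc kv =>
      let findings := kv.2
      if findings = [] then acc
      else
        match PySem.List.max? (findings.map (fun p => PySem.Dict.getD pvDeductions p.1 0)) (fun x => x) with
        | some worst => acc + worst
        | none => acc) 0
  max 0 (100 - total_deducted)

-- ===== PORT B =====
def pvPriority : List (String × Int) :=
  [("CRITICAL", 20), ("HIGH", 12), ("MEDIUM", 4), ("LOW", 1)]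

-- the inner 'for sev, ded in _PRIORITY: if sev in present: … break' loop
def pvScan : List (String × Int) → PySem.Set String → Int
  | [], _ => 0
  | (sev, ded) :: rest, present =>
      if PySem.Set.contains present sev then ded else pvScan rest present

def score_findings_py_alt (all_findings : List (String × List (String × String))) : Int :=
  let total_deducted :=
    all_findings.foldl (fun acc kv =>
      acc + pvScan pvPriority (PySem.Set.ofList (kv.2.map Prod.fst))) 0
  max 0 (100 - total_deducted)

-- ===== PRECONDITION & SPEC =====
def Spec_score_findings_py (all_findings : List (String × List (String × String))) (out : Int) : Prop := out = score_findings_py_alt all_findings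
instance (all_findings : List (String × List (String × String))) (out : Int) : Decidable (Spec_score_findings_py all_findings out) := by unfold Spec_score_findings_py; infer_instance

-- ===== CLAIM (what is proved, stated in full; the proofs are below) =====
def Claim_equal_score_findings_py : Prop := ∀ (all_findings : List (String × List (String × String))), Dom_score_findings_py all_findings → Spec_score_findings_py all_findings (score_findings_py all_findings)

-- ===== LEMMAS AND PROOFS =====

-- deduction of a single severity, as A computes it
def pvDed (s : String) : Int := PySem.Dict.getD pvDeductions s 0

-- priority-scan value expressed over the plain list of severities
def pvG (ss : List String) : Int :=
  if "CRITICAL" ∈ ss then 20 else if "HIGH" ∈ ss then 12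
  else if "MEDIUM" ∈ ss then 4 else if "LOW" ∈ ss then 1 else 0

theorem pvDed_eq (s : String) :
    pvDed s = if s = "CRITICAL" then 20 else if s = "HIGH" then 12
      else if s = "MEDIUM" then 4 else if s = "LOW" then 1 else 0 := by
  have hd : pvDeductions = PySem.Dict.mk [("CRITICAL", (20 : Int)), ("HIGH", 12), ("MEDIUM", 4), ("LOW", 1)] := by decide
  rw [pvDed, hd]
  simp [PySem.Dict.getD, PySem.Dict.get?]
  split_ifs with h1 h2 h3 h4
  · subst h1; decide
  · subst h2; decide
  · subst h3; decide
  · subst h4; decide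
  · have c1 : (("CRITICAL" : String) == s) = false := beq_eq_false_iff_ne.mpr (Ne.symm h1)
    have c2 : (("HIGH" : String) == s) = false := beq_eq_false_iff_ne.mpr (Ne.symm h2)
    have c3 : (("MEDIUM" : String) == s) = false := beq_eq_false_iff_ne.mpr (Ne.symm h3)
    have c4 : (("LOW" : String) == s) = false := beq_eq_false_iff_ne.mpr (Ne.symm h4)
    simp [c1, c2, c3, c4]
theorem pvDed_nonneg (s : String) : 0 ≤ pvDed s := by
  rw [pvDed_eq]; split_ifs <;> omega

theorem pvG_nonneg (ss : List String) : 0 ≤ pvG ss := by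
  unfold pvG; split_ifs <;> omega

theorem pvG_eq20 {ss : List String} (m1 : "CRITICAL" ∈ ss) : pvG ss = 20 := by
  simp [pvG, m1]

theorem pvG_le12 (ss : List String) (m1 : "CRITICAL" ∉ ss) : pvG ss ≤ 12 := by
  unfold pvG; rw [if_neg m1]; split_ifs <;> omega

theorem pvG_le4 (ss : List String) (m1 : "CRITICAL" ∉ ss) (m2 : "HIGH" ∉ ss) : pvG ss ≤ 4 := by
  unfold pvG; rw [if_neg m1, if_neg m2]; split_ifs <;> omega

theorem pvG_le1 (ss : List String) (m1 : "CRITICAL" ∉ ss) (m2 : "HIGH" ∉ ss)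
    (m3 : "MEDIUM" ∉ ss) : pvG ss ≤ 1 := by
  unfold pvG; rw [if_neg m1, if_neg m2, if_neg m3]; split_ifs <;> omega

theorem pvG_cons (s : String) (ss : List String) :
    pvG (s :: ss) = max (pvDed s) (pvG ss) := by
  rw [pvDed_eq]
  by_cases h1 : s = "CRITICAL"
  · subst h1
    have l : pvG ("CRITICAL" :: ss) = 20 := by simp [pvG, List.mem_cons]
    have b20 : pvG ss ≤ 20 := by unfold pvG; split_ifs <;> omega
    rw [l]; simp; exact b20
  by_cases h2 : s = "HIGH"
  · subst h2
    simp only [h1, if_false]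
    by_cases m1 : "CRITICAL" ∈ ss
    · have l : pvG ("HIGH" :: ss) = 20 := by simp [pvG, List.mem_cons, m1]
      rw [l, pvG_eq20 m1]; norm_num
    · have l : pvG ("HIGH" :: ss) = 12 := by simp [pvG, List.mem_cons, m1]
      rw [l]; exact (max_eq_left (pvG_le12 ss m1)).symm
  by_cases h3 : s = "MEDIUM"
  · subst h3
    simp only [h1, h2, if_false]
    by_cases m1 : "CRITICAL" ∈ ss
    · have l : pvG ("MEDIUM" :: ss) = 20 := by simp [pvG, List.mem_cons, m1]
      rw [l, pvG_eq20 m1]; norm_num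
    by_cases m2 : "HIGH" ∈ ss
    · have l : pvG ("MEDIUM" :: ss) = 12 := by simp [pvG, List.mem_cons, m1, m2]
      have r : pvG ss = 12 := by simp [pvG, m1, m2]
      rw [l, r]; norm_num
    · have l : pvG ("MEDIUM" :: ss) = 4 := by simp [pvG, List.mem_cons, m1, m2]
      rw [l]; exact (max_eq_left (pvG_le4 ss m1 m2)).symm
  by_cases h4 : s = "LOW"
  · subst h4
    simp only [h1, h2, h3, if_false]
    by_cases m1 : "CRITICAL" ∈ ss
    · have l : pvG ("LOW" :: ss) = 20 := by simp [pvG, List.mem_cons, m1]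
      rw [l, pvG_eq20 m1]; norm_num
    by_cases m2 : "HIGH" ∈ ss
    · have l : pvG ("LOW" :: ss) = 12 := by simp [pvG, List.mem_cons, m1, m2]
      have r : pvG ss = 12 := by simp [pvG, m1, m2]
      rw [l, r]; norm_num
    by_cases m3 : "MEDIUM" ∈ ss
    · have l : pvG ("LOW" :: ss) = 4 := by simp [pvG, List.mem_cons, m1, m2, m3]
      have r : pvG ss = 4 := by simp [pvG, m1, m2, m3]
      rw [l, r]; norm_num
    · have l : pvG ("LOW" :: ss) = 1 := by simp [pvG, List.mem_cons, m1, m2, m3]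
      rw [l]; exact (max_eq_left (pvG_le1 ss m1 m2 m3)).symm
  · have l : pvG (s :: ss) = pvG ss := by
      simp [pvG, List.mem_cons, Ne.symm h1, Ne.symm h2, Ne.symm h3, Ne.symm h4]
    rw [l]
    simp only [h1, h2, h3, h4, if_false]
    exact (max_eq_right (pvG_nonneg ss)).symm

theorem pvFoldlMax (t : List (String × String)) :
    ∀ a : Int, 0 ≤ a →
      (t.map (fun p => pvDed p.1)).foldl max a = max a (pvG (t.map Prod.fst)) := by
  induction t with
  | nil => intro a ha; simp [pvG]; exact ha
  | cons f t ih =>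
      intro a ha
      simp only [List.map_cons, List.foldl_cons]
      rw [ih (max a (pvDed f.1)) (le_trans ha (le_max_left _ _)), pvG_cons]
      exact max_assoc a (pvDed f.1) (pvG (t.map Prod.fst))

theorem pvScan_eq_pvG (l : List (String × String)) :
    pvScan pvPriority (PySem.Set.ofList (l.map Prod.fst)) = pvG (l.map Prod.fst) := by
  simp only [pvScan, pvPriority, PySem.Set.contains_eq_listContains]
  have hc : ∀ x : String,
      (List.contains (PySem.Set.ofList (l.map Prod.fst)) x = true) = (x ∈ l.map Prod.fst) := by
    intro x; simp [PySem.Set.mem_ofList]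
  simp only [hc, pvG]

theorem pvStep_eq (l : List (String × String)) :
    (if l = [] then (0 : Int)
     else match PySem.List.max? (l.map (fun p => PySem.Dict.getD pvDeductions p.1 0)) (fun x => x) with
          | some worst => worst
          | none => 0) = pvScan pvPriority (PySem.Set.ofList (l.map Prod.fst)) := by
  rw [pvScan_eq_pvG]
  cases l with
  | nil => simp [pvG]
  | cons f t =>
      have : (f :: t).map (fun p => PySem.Dict.getD pvDeductions p.1 0)
          = pvDed f.1 :: t.map (fun p => pvDed p.1) := by simp [pvDed]
      rw [this, PySem.List.max?_id_cons]
      rw [pvFoldlMax t (pvDed f.1) (pvDed_nonneg _)]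
      simp [pvG_cons]

theorem pvFold_eq (l : List (String × List (String × String))) :
    ∀ acc : Int,
      l.foldl (fun acc kv =>
        let findings := kv.2
        if findings = [] then acc
        else
          match PySem.List.max? (findings.map (fun p => PySem.Dict.getD pvDeductions p.1 0)) (fun x => x) with
          | some worst => acc + worst
          | none => acc) acc
      = l.foldl (fun acc kv =>
          acc + pvScan pvPriority (PySem.Set.ofList (kv.2.map Prod.fst))) acc := by
  induction l with
  | nil => intro acc; rfl
  | cons kv t ih =>
      intro acc
      simp only [List.foldl_cons]
      rw [← ih]
      congr 1
      have h := pvStep_eq kv.2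
      by_cases he : kv.2 = []
      · simp [he] at h ⊢; omega
      · simp only [he, if_false] at h ⊢
        cases hm : PySem.List.max? (kv.2.map (fun p => PySem.Dict.getD pvDeductions p.1 0)) (fun x => x) with
        | none => simp [hm] at h ⊢; omega
        | some w => simp [hm] at h ⊢; omega

-- ===== VERDICT (by name: the statement is the Claim_ definition above) =====
theorem score_findings_py_spec : Claim_equal_score_findings_py := by
  intro all_findings _
  unfold Spec_score_findings_py score_findings_py score_findings_py_alt
  rw [pvFold_eq]
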